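-- pv_equiv track=rewrite | github.com/Devel-ash/Expense-tracker | calculate.py | arrange_income
-- ===== SOURCE A (Python) =====
-- def arrange_income (amounts):
--     Income = {"Necessary": [], "Not_Necessary": []}
--     Expense = {"Necessary": [], "Not_Necessary": []}
--     for amount, nec in amounts:
--         if amount > 0:
--             if nec == 1:
--                 Income["Necessary"].append(amount)
--             else:
--                 Income["Not_Necessary"].append(amount)
--         else:
--             if nec == 1:
--                 Expense["Necessary"].append(amount)
--             else:
--                 Expense["Not_Necessary"].append(amount)
--     return Income, Expense
-- ===== SOURCE B (Python) =====
-- def arrange_income(amounts):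
--     Income = {
--         "Necessary": [a for a, n in amounts if a > 0 and n == 1],
--         "Not_Necessary": [a for a, n in amounts if a > 0 and n != 1],
--     }
--     Expense = {
--         "Necessary": [a for a, n in amounts if a <= 0 and n == 1],
--         "Not_Necessary": [a for a, n in amounts if a <= 0 and n != 1],
--     }
--     return Income, Expense
-- ===== Notes on version B (the rewrite author's own statement) =====
-- stated objective: simpler
-- what changed: Replaces the single mutating bucketing loop over two pre-built dicts with four independent list comprehensions, one per bucket, each filtering the input with its own compound predicate; the dicts are built directly from these lists.
import Mathlib
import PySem

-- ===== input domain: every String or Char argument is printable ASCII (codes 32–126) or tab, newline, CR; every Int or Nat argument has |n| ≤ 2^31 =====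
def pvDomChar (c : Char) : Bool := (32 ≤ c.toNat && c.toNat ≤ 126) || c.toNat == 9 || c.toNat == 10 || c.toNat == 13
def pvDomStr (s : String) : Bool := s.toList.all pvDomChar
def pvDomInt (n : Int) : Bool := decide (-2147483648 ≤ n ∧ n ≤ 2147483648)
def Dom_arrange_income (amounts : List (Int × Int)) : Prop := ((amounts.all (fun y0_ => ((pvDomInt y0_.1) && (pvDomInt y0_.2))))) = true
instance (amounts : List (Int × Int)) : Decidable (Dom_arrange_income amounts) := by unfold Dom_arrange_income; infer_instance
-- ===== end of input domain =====

-- B replaces A's single mutating bucketing loop with four independent filtering comprehensions, one per bucket (objective: simpler).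


-- ===== PORT A =====
-- Income["…"].append(x) is ported as Dict.modify "…" [] (· ++ [x]); the returned dicts become their assoc lists (.items).
def arrange_income (amounts : List (Int × Int)) : (List (String × List Int)) × (List (String × List Int)) :=
  let income : PySem.Dict String (List Int) := PySem.Dict.mk [("Necessary", []), ("Not_Necessary", [])]
  let expense : PySem.Dict String (List Int) := PySem.Dict.mk [("Necessary", []), ("Not_Necessary", [])]
  let (income, expense) := amounts.foldl
    (fun (st : PySem.Dict String (List Int) × PySem.Dict String (List Int)) p =>
      let (income, expense) := st
      let (amount, nec) := p
      if amount > 0 then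
        if nec = 1 then (income.modify "Necessary" [] (· ++ [amount]), expense)
        else (income.modify "Not_Necessary" [] (· ++ [amount]), expense)
      else
        if nec = 1 then (income, expense.modify "Necessary" [] (· ++ [amount]))
        else (income, expense.modify "Not_Necessary" [] (· ++ [amount])))
    (income, expense)
  (income.items, expense.items)

-- ===== PORT B =====
-- each bucket is its own comprehension: [a for a, n in amounts if <predicate>]
def arrange_income_alt (amounts : List (Int × Int)) : (List (String × List Int)) × (List (String × List Int)) :=
  ([("Necessary",     (amounts.filter (fun p => p.1 > 0 && p.2 == 1)).map (·.1)),
    ("Not_Necessary", (amounts.filter (fun p => p.1 > 0 && p.2 != 1)).map (·.1))],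
   [("Necessary",     (amounts.filter (fun p => p.1 ≤ 0 && p.2 == 1)).map (·.1)),
    ("Not_Necessary", (amounts.filter (fun p => p.1 ≤ 0 && p.2 != 1)).map (·.1))])

-- ===== PRECONDITION & SPEC =====
def Spec_arrange_income (amounts : List (Int × Int)) (out : (List (String × List Int)) × (List (String × List Int))) : Prop := out = arrange_income_alt amounts
instance (amounts : List (Int × Int)) (out : (List (String × List Int)) × (List (String × List Int))) : Decidable (Spec_arrange_income amounts out) := by unfold Spec_arrange_income; infer_instance

-- ===== CLAIM (what is proved, stated in full; the proofs are below) =====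
def Claim_equal_arrange_income : Prop := ∀ (amounts : List (Int × Int)), Dom_arrange_income amounts → Spec_arrange_income amounts (arrange_income amounts)

-- ===== LEMMAS AND PROOFS =====

-- loop invariant: starting from two literal two-key dicts, A's fold appends each bucket's filtered amounts.
lemma arrange_loop_inv (amounts : List (Int × Int)) (a b c d : List Int) :
    amounts.foldl
      (fun (st : PySem.Dict String (List Int) × PySem.Dict String (List Int)) p =>
        let (income, expense) := st
        let (amount, nec) := p
        if amount > 0 then
          if nec = 1 then (income.modify "Necessary" [] (· ++ [amount]), expense)
          else (income.modify "Not_Necessary" [] (· ++ [amount]), expense)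
        else
          if nec = 1 then (income, expense.modify "Necessary" [] (· ++ [amount]))
          else (income, expense.modify "Not_Necessary" [] (· ++ [amount])))
      (PySem.Dict.mk [("Necessary", a), ("Not_Necessary", b)],
       PySem.Dict.mk [("Necessary", c), ("Not_Necessary", d)]) =
    (PySem.Dict.mk [("Necessary", a ++ (amounts.filter (fun p => p.1 > 0 && p.2 == 1)).map (·.1)),
                    ("Not_Necessary", b ++ (amounts.filter (fun p => p.1 > 0 && p.2 != 1)).map (·.1))],
     PySem.Dict.mk [("Necessary", c ++ (amounts.filter (fun p => p.1 ≤ 0 && p.2 == 1)).map (·.1)),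
                    ("Not_Necessary", d ++ (amounts.filter (fun p => p.1 ≤ 0 && p.2 != 1)).map (·.1))]) := by
  induction amounts generalizing a b c d with
  | nil => simp
  | cons hd tl ih =>
    obtain ⟨amount, nec⟩ := hd
    rw [List.foldl_cons]
    by_cases h1 : amount > 0 <;> by_cases h2 : nec = 1
    · refine Eq.trans ?_ ((ih (a ++ [amount]) b c d).trans ?_)
      · congr 1
        simp [h1, h2, PySem.Dict.modify, PySem.Dict.insert, PySem.Dict.getD, PySem.Dict.get?, PySem.Dict.contains]
      · simp [List.filter_cons, h1, h2, show ¬ amount ≤ 0 by omega]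
    · refine Eq.trans ?_ ((ih a (b ++ [amount]) c d).trans ?_)
      · congr 1
        simp [h1, h2, PySem.Dict.modify, PySem.Dict.insert, PySem.Dict.getD, PySem.Dict.get?, PySem.Dict.contains]
      · simp [List.filter_cons, h1, h2, show ¬ amount ≤ 0 by omega]
    · refine Eq.trans ?_ ((ih a b (c ++ [amount]) d).trans ?_)
      · congr 1
        simp [h1, h2, PySem.Dict.modify, PySem.Dict.insert, PySem.Dict.getD, PySem.Dict.get?, PySem.Dict.contains]
      · simp [List.filter_cons, h1, h2, show amount ≤ 0 by omega]
    · refine Eq.trans ?_ ((ih a b c (d ++ [amount])).trans ?_)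
      · congr 1
        simp [h1, h2, PySem.Dict.modify, PySem.Dict.insert, PySem.Dict.getD, PySem.Dict.get?, PySem.Dict.contains]
      · simp [List.filter_cons, h1, h2, show amount ≤ 0 by omega]

-- ===== VERDICT (by name: the statement is the Claim_ definition above) =====
theorem arrange_income_spec : Claim_equal_arrange_income := by
  intro amounts _
  show arrange_income amounts = arrange_income_alt amounts
  simp only [arrange_income, arrange_income_alt, arrange_loop_inv, List.nil_append]
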